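-- pv_equiv track=rewrite | github.com/MikoMikocchi/chessie | src/chessie/core/notation.py | pgn_movetext_from_sans
-- ===== SOURCE A (Python) =====
-- def pgn_movetext_from_sans(sans: list[str], result_token: str) -> str:
--     """Build PGN movetext from SAN moves and a result token."""
--     parts: list[str] = []
--     for ply, san in enumerate(sans):
--         if ply % 2 == 0:
--             parts.append(f"{(ply // 2) + 1}.")
--         parts.append(san)
--     parts.append(result_token)
--     return " ".join(parts)
-- ===== SOURCE B (Python) =====
-- def pgn_movetext_from_sans(sans: list[str], result_token: str) -> str:
--     """Build PGN movetext from SAN moves and a result token."""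
--     parts: list[str] = []
--     it = iter(sans)
--     m = 1
--     for white in it:
--         parts.append(f"{m}.")
--         parts.append(white)
--         black = next(it, None)
--         if black is not None:
--             parts.append(black)
--         m += 1
--     parts.append(result_token)
--     return " ".join(parts)
-- ===== Notes on version B (the rewrite author's own statement) =====
-- stated objective: alternative
-- what changed: B pairs the plies into full moves by pulling white and black from a shared iterator (two elements per iteration), instead of A's per-ply loop that tests the index's parity to decide when to emit a move number.
import Mathlib
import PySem

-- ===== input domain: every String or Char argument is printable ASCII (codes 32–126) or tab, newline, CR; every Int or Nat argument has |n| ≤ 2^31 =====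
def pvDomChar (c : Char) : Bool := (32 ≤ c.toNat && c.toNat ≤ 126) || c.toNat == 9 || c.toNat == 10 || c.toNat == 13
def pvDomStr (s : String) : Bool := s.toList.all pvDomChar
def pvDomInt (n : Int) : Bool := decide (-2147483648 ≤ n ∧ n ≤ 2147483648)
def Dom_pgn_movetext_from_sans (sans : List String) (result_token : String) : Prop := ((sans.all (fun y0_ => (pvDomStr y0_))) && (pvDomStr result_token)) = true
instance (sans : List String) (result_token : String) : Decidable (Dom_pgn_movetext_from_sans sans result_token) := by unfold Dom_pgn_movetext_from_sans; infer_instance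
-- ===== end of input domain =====

-- ===== PORT A =====
-- B differs by pairing plies into full moves via a shared iterator (two pulls per iteration) instead of A's accumulator loop with a parity test.
def pgn_movetext_from_sans (sans : List String) (result_token : String) : String :=
  let parts : List String :=
    (PySem.List.enumerate sans 0).foldl
      (fun parts p =>
        let parts := if PySem.Int.mod p.1 2 == 0
          then parts ++ [PySem.Int.toStr (PySem.Int.floordiv p.1 2 + 1) ++ "."]
          else parts
        parts ++ [p.2]) []
  PySem.Str.join " " (parts ++ [result_token])

-- ===== PORT B =====
-- Source B's for-loop over the shared iterator: each iteration consumes the white ply and,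
-- via next(it, None), the black ply if present
def pgnLoop (m : Int) (parts : List String) : List String → List String
  | [] => parts
  | [w] => parts ++ [PySem.Int.toStr m ++ ".", w]
  | w :: b :: rest => pgnLoop (m + 1) (parts ++ [PySem.Int.toStr m ++ ".", w, b]) rest

def pgn_movetext_from_sans_alt (sans : List String) (result_token : String) : String :=
  PySem.Str.join " " (pgnLoop 1 [] sans ++ [result_token])

-- ===== PRECONDITION & SPEC =====
def Spec_pgn_movetext_from_sans (sans : List String) (result_token : String) (out : String) : Prop := out = pgn_movetext_from_sans_alt sans result_token
instance (sans : List String) (result_token : String) (out : String) : Decidable (Spec_pgn_movetext_from_sans sans result_token out) := by unfold Spec_pgn_movetext_from_sans; infer_instance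

-- ===== CLAIM (what is proved, stated in full; the proofs are below) =====
def Claim_equal_pgn_movetext_from_sans : Prop := ∀ (sans : List String) (result_token : String), Dom_pgn_movetext_from_sans sans result_token → Spec_pgn_movetext_from_sans sans result_token (pgn_movetext_from_sans sans result_token)

-- ===== LEMMAS AND PROOFS =====

-- induction two plies at a time
theorem twoStep {motive : List String → Prop} (h0 : motive []) (h1 : ∀ x, motive [x])
    (h2 : ∀ x y r, motive r → motive (x :: y :: r)) : ∀ l, motive l
  | [] => h0
  | [x] => h1 x
  | x :: y :: r => h2 x y r (twoStep h0 h1 h2 r)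

-- A's fold over the enumerated plies, started at even index 2*t, equals B's pair loop from move t+1
theorem pv_A_fold (rest : List String) : ∀ (t : Nat) (acc : List String),
    (PySem.List.enumerate rest (2 * (t : Int))).foldl
      (fun parts p =>
        (if PySem.Int.mod p.1 2 == 0
          then parts ++ [PySem.Int.toStr (PySem.Int.floordiv p.1 2 + 1) ++ "."]
          else parts) ++ [p.2]) acc
      = pgnLoop ((t : Int) + 1) acc rest := by
  induction rest using twoStep with
  | h0 => intro t acc; simp [PySem.List.enumerate_nil, pgnLoop]
  | h1 x =>
    intro t acc
    simp [PySem.List.enumerate_cons, PySem.List.enumerate_nil, pgnLoop]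
  | h2 x y r ih =>
    intro t acc
    simp only [PySem.List.enumerate_cons, List.foldl_cons]
    have e1 : (2 * (t : Int)) + 1 + 1 = 2 * ((t + 1 : Nat) : Int) := by push_cast; ring
    rw [e1, ih (t + 1)]
    simp [pgnLoop]

-- ===== VERDICT (by name: the statement is the Claim_ definition above) =====
theorem pgn_movetext_from_sans_spec : Claim_equal_pgn_movetext_from_sans := by
  unfold Claim_equal_pgn_movetext_from_sans
  intro sans result_token _
  unfold Spec_pgn_movetext_from_sans pgn_movetext_from_sans pgn_movetext_from_sans_alt
  have hA := pv_A_fold sans 0 []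
  simp only [Nat.cast_zero, mul_zero, zero_add] at hA
  exact congrArg (fun l => PySem.Str.join " " (l ++ [result_token])) hA
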